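-- pv_equiv track=rewrite | github.com/SilentMoebuta/retrain_jieba_hmm_model | re_gen_jieba_hmm/re_gen_hmm.py | res_merge
-- ===== SOURCE A (Python) =====
-- def res_merge(ab):
--     ab = sorted(ab, key=lambda x: x[0], reverse=True)
--     res = [ab[0]]
--     for i in range(1, len(ab)):
--         if res[-1][0] == ab[i][0]:
--             res[-1][1] += ab[i][1]
--         else:
--             res.append(ab[i])
--     return res
-- ===== SOURCE B (Python) =====
-- def res_merge(ab):
--     agg = {}
--     for pair in ab:
--         k = pair[0]
--         if k in agg:
--             agg[k][1] += pair[1]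
--         else:
--             agg[k] = pair
--     return sorted(agg.values(), key=lambda x: x[0], reverse=True)
-- ===== Notes on version B (the rewrite author's own statement) =====
-- stated objective: idiomatic
-- what changed: Replaces sort-then-adjacent-merge with a single dict-aggregation pass (first occurrence kept as representative, values summed in place) followed by a sort of only the distinct-key representatives.
import Mathlib
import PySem

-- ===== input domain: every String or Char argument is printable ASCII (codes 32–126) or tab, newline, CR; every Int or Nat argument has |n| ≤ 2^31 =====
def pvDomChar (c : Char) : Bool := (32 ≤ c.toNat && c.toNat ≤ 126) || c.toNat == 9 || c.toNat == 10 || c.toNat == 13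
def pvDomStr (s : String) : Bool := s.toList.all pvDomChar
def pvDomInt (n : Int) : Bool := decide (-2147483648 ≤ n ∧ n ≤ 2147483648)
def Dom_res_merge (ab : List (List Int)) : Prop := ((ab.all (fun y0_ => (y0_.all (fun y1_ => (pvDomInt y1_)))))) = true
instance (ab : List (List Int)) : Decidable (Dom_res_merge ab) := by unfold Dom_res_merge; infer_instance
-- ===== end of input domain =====

-- B replaces A's sort-then-adjacent-merge by one dict-aggregation pass plus a sort of only the
-- distinct-key representatives.  Equivalence is about the RETURN value: in Python both A and B
-- mutate the representative inner lists in place (`res[-1][1] += …` / `agg[k][1] += …`); the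
-- in-place element update is modelled here as replacing the corresponding slot by its new value.

-- ===== PORT A =====
def res_merge (ab : List (List Int)) : List (List Int) :=
  let ab2 := PySem.List.sorted ab (fun x => PySem.List.pyGetD x 0 0) true
  (PySem.List.pyRange 1 (ab2.length : Int)).foldl
    (fun res i =>
      if PySem.List.pyGetD (PySem.List.pyGetD res (-1) []) 0 0
           == PySem.List.pyGetD (PySem.List.pyGetD ab2 i []) 0 0 then
        -- res[-1][1] += ab[i][1]
        PySem.List.pySetD res (-1)
          ((PySem.List.pyGetD res (-1) []).set 1
            (PySem.List.pyGetD (PySem.List.pyGetD res (-1) []) 1 0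
              + PySem.List.pyGetD (PySem.List.pyGetD ab2 i []) 1 0))
      else
        res ++ [PySem.List.pyGetD ab2 i []])
    [PySem.List.pyGetD ab2 0 []]

-- ===== PORT B =====
def res_merge_alt (ab : List (List Int)) : List (List Int) :=
  let agg := ab.foldl
    (fun (agg : PySem.Dict Int (List Int)) pair =>
      -- if pair[0] in agg: agg[pair[0]][1] += pair[1]  else: agg[pair[0]] = pair
      agg.insert (PySem.List.pyGetD pair 0 0)
        (if agg.contains (PySem.List.pyGetD pair 0 0) then
          (agg.getD (PySem.List.pyGetD pair 0 0) []).set 1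
            (PySem.List.pyGetD (agg.getD (PySem.List.pyGetD pair 0 0) []) 1 0
              + PySem.List.pyGetD pair 1 0)
        else pair))
    PySem.Dict.empty
  PySem.List.sorted agg.values (fun x => PySem.List.pyGetD x 0 0) true

-- ===== PRECONDITION & SPEC =====
-- A raises IndexError on the empty list (ab[0]), on an empty inner list (x[0] while sorting),
-- and on x[1] whenever a key occurs more than once and some inner list of that key group is
-- shorter than 2; Pre_ excludes exactly those inputs.
def Pre_res_merge (ab : List (List Int)) : Prop :=
  ab ≠ [] ∧ ∀ x ∈ ab, x ≠ [] ∧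
    (2 ≤ x.length ∨ ab.countP (fun y => y.headD 0 == x.headD 0) = 1)
instance (ab : List (List Int)) : Decidable (Pre_res_merge ab) := by
  unfold Pre_res_merge; infer_instance

def pvWitness_res_merge : List (List Int) := [[3, 1], [2, 5], [3, 2], [0, 4]]

def Spec_res_merge (ab : List (List Int)) (out : List (List Int)) : Prop := out = res_merge_alt ab
instance (ab : List (List Int)) (out : List (List Int)) : Decidable (Spec_res_merge ab out) := by
  unfold Spec_res_merge; infer_instance

-- ===== CLAIM (what is proved, stated in full; the proofs are below) =====
def Claim_equal_res_merge : Prop :=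
  ∀ (ab : List (List Int)), Dom_res_merge ab → Pre_res_merge ab → Spec_res_merge ab (res_merge ab)

-- ===== LEMMAS AND PROOFS =====

-- key and value of a pair (x[0], x[1] as A/B read them)
def kf (x : List Int) : Int := PySem.List.pyGetD x 0 0
def vf (x : List Int) : Int := PySem.List.pyGetD x 1 0
-- the group of a key, its representative-with-total, first-occurrence key dedup
def grp (l : List (List Int)) (k : Int) : List (List Int) := l.filter (fun x => kf x == k)
def itm (l : List (List Int)) (k : Int) : List Int :=
  ((grp l k).headD []).set 1 (((grp l k).map vf).sum)
def dkL : List Int → List Int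
  | [] => []
  | k :: ks => k :: (dkL ks).filter (fun j => j != k)
-- A's merging loop, as a recursion on the remaining (sorted) pairs
def mergeRun (c : List Int) : List (List Int) → List (List Int)
  | [] => [c]
  | y :: t => if kf c == kf y then mergeRun (c.set 1 (vf c + vf y)) t else c :: mergeRun y t

lemma kf_eq_headD (x : List Int) : kf x = x.headD 0 := by
  cases x <;> simp [kf, PySem.List.pyGetD_zero]

lemma kf_set (r : List Int) (v : Int) : kf (r.set 1 v) = kf r := by
  cases r <;> simp [kf, PySem.List.pyGetD_zero]

lemma set_one_vf (r : List Int) : r.set 1 (vf r) = r := by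
  match r with
  | [] => rfl
  | [a] => rfl
  | a :: b :: t => simp [vf, PySem.List.pyGetD]

lemma vf_set (r : List Int) (v : Int) (h : 2 ≤ r.length) : vf (r.set 1 v) = v := by
  match r, h with
  | a :: b :: t, _ => simp [vf, PySem.List.pyGetD]

lemma pySetD_append_neg_one (xs : List (List Int)) (c v : List Int) :
    PySem.List.pySetD (xs ++ [c]) (-1) v = xs ++ [v] := by
  simp [PySem.List.pySetD, PySem.List.pySet?, PySem.List.pyIdx?]


lemma one_le_countP {α : Type} (l : List α) (p : α → Bool) {x : α} (hx : x ∈ l)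
    (hpx : p x = true) : 1 ≤ l.countP p := by
  rw [List.countP_eq_length_filter]
  exact List.length_pos_of_mem (List.mem_filter.2 ⟨hx, hpx⟩)

-- grp through cons / append
lemma grp_cons (x : List Int) (l : List (List Int)) (k : Int) :
    grp (x :: l) k = if kf x == k then x :: grp l k else grp l k := by
  simp [grp, List.filter_cons]

lemma grp_append (l₁ l₂ : List (List Int)) (k : Int) :
    grp (l₁ ++ l₂) k = grp l₁ k ++ grp l₂ k := by
  simp [grp]

lemma grp_eq_nil (l : List (List Int)) (k : Int) (h : ∀ x ∈ l, kf x ≠ k) : grp l k = [] := by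
  simp only [grp, List.filter_eq_nil_iff]
  intro x hx; simpa using h x hx

lemma kf_head_grp (l : List (List Int)) (k : Int) (h : grp l k ≠ []) :
    kf ((grp l k).headD []) = k := by
  rcases hg : grp l k with _ | ⟨a, t⟩
  · exact absurd hg h
  · have ha : a ∈ grp l k := by rw [hg]; exact List.mem_cons_self
    have := List.of_mem_filter (p := fun x => kf x == k) ha
    simpa using this

lemma grp_ne_nil_of_mem (l : List (List Int)) (k : Int) (h : k ∈ l.map kf) : grp l k ≠ [] := by
  rcases List.mem_map.1 h with ⟨x, hx, hk⟩
  intro hnil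
  have : x ∈ grp l k := List.mem_filter.2 ⟨hx, by simp [hk]⟩
  simp [hnil] at this

lemma kf_itm (l : List (List Int)) (k : Int) (h : k ∈ l.map kf) : kf (itm l k) = k := by
  rw [itm, kf_set]
  exact kf_head_grp l k (grp_ne_nil_of_mem l k h)

-- dkL facts
lemma mem_dkL (l : List Int) (j : Int) : j ∈ dkL l ↔ j ∈ l := by
  induction l with
  | nil => simp [dkL]
  | cons k ks ih =>
    by_cases h : j = k <;> simp [dkL, List.mem_filter, ih, h]

lemma dkL_pairwise_gt (l : List Int) (h : l.Pairwise (fun a b => b ≤ a)) :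
    (dkL l).Pairwise (fun a b => b < a) := by
  induction l with
  | nil => simpa [dkL] using h
  | cons k ks ih =>
    rcases List.pairwise_cons.1 h with ⟨hk, hks⟩
    refine List.pairwise_cons.2 ⟨?_, List.Pairwise.filter _ (ih hks)⟩
    intro j hj
    have hj' := List.mem_filter.1 hj
    have hle : j ≤ k := hk j ((mem_dkL ks j).1 hj'.1)
    have hne : j ≠ k := by simpa using hj'.2
    exact lt_of_le_of_ne hle hne

lemma dkL_nodup (l : List Int) (h : l.Pairwise (fun a b => b ≤ a)) : (dkL l).Nodup := by
  exact (dkL_pairwise_gt l h).imp (fun hlt => (ne_of_gt hlt))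

-- the step function of A's loop after the range is bridged away
def stepA (res : List (List Int)) (cur : List Int) : List (List Int) :=
  if PySem.List.pyGetD (PySem.List.pyGetD res (-1) []) 0 0 == PySem.List.pyGetD cur 0 0 then
    PySem.List.pySetD res (-1)
      ((PySem.List.pyGetD res (-1) []).set 1
        (PySem.List.pyGetD (PySem.List.pyGetD res (-1) []) 1 0 + PySem.List.pyGetD cur 1 0))
  else res ++ [cur]

lemma foldlA (t : List (List Int)) : ∀ (acc : List (List Int)) (c : List Int),
    t.foldl stepA (acc ++ [c]) = acc ++ mergeRun c t := by
  induction t with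
  | nil => intro acc c; simp [mergeRun]
  | cons y t ih =>
    intro acc c
    rw [List.foldl_cons]
    by_cases h : kf c = kf y
    · have h' : PySem.List.pyGetD c 0 0 = PySem.List.pyGetD y 0 0 := h
      have hb : stepA (acc ++ [c]) y = acc ++ [c.set 1 (vf c + vf y)] := by
        simp [stepA, PySem.List.pyGetD_neg_one_append_singleton, pySetD_append_neg_one, h']
        rfl
      rw [hb, ih acc (c.set 1 (vf c + vf y))]
      have : mergeRun c (y :: t) = mergeRun (c.set 1 (vf c + vf y)) t := by
        simp [mergeRun, h]
      rw [this]
    · have h' : ¬ PySem.List.pyGetD c 0 0 = PySem.List.pyGetD y 0 0 := h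
      have hb : stepA (acc ++ [c]) y = (acc ++ [c]) ++ [y] := by
        simp [stepA, PySem.List.pyGetD_neg_one_append_singleton, h']
      rw [hb, ih (acc ++ [c]) y]
      have : mergeRun c (y :: t) = c :: mergeRun y t := by
        simp [mergeRun, h]
      rw [this]
      simp

-- A's merging loop computes, for each key in first-occurrence (= descending) order,
-- the representative with its second slot replaced by the group total.
lemma runSpec : ∀ (t : List (List Int)) (c : List Int),
    (c :: t).Pairwise (fun a b => kf b ≤ kf a) →
    (2 ≤ c.length ∨ ∀ y ∈ t, kf y ≠ kf c) →
    (∀ x ∈ t, 2 ≤ x.length ∨ (c :: t).countP (fun y => kf y == kf x) = 1) →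
    mergeRun c t = (dkL ((c :: t).map kf)).map (fun k => itm (c :: t) k) := by
  intro t
  induction t with
  | nil =>
    intro c _ _ _
    simp [mergeRun, dkL, itm, grp_cons, grp, set_one_vf]
  | cons y t ih =>
    intro c hpair hc ht
    have hyc : kf y ≤ kf c := (List.pairwise_cons.1 hpair).1 y List.mem_cons_self
    have htc : ∀ z ∈ t, kf z ≤ kf c := fun z hz =>
      (List.pairwise_cons.1 hpair).1 z (List.mem_cons_of_mem _ hz)
    have hyt : ∀ z ∈ t, kf z ≤ kf y :=
      fun z hz => (List.pairwise_cons.1 (List.pairwise_cons.1 hpair).2).1 z hz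
    have htt : t.Pairwise (fun a b => kf b ≤ kf a) :=
      (List.pairwise_cons.1 (List.pairwise_cons.1 hpair).2).2
    by_cases h : kf c = kf y
    · -- merge branch
      have hc2 : 2 ≤ c.length := by
        rcases hc with hc | hc
        · exact hc
        · exact absurd h.symm (hc y List.mem_cons_self)
      have hLHS : mergeRun c (y :: t) = mergeRun (c.set 1 (vf c + vf y)) t := by
        simp [mergeRun, h]
      set c' := c.set 1 (vf c + vf y) with hc'
      have hkc' : kf c' = kf c := kf_set c (vf c + vf y)
      have hIH : mergeRun c' t = (dkL ((c' :: t).map kf)).map (fun k => itm (c' :: t) k) := by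
        refine ih c' ?_ ?_ ?_
        · exact List.pairwise_cons.2 ⟨fun z hz => by rw [hkc']; exact htc z hz, htt⟩
        · left; simpa [hc'] using hc2
        · intro x hx
          rcases ht x (List.mem_cons_of_mem _ hx) with h2 | h1
          · exact Or.inl h2
          · right
            have hx1 : 1 ≤ t.countP (fun y => kf y == kf x) :=
              one_le_countP t _ hx (by simp)
            rw [List.countP_cons, List.countP_cons] at h1
            rw [List.countP_cons, hkc']
            by_cases hyx : (kf y == kf x) = true
            · by_cases hcx : (kf c == kf x) = true
              · rw [if_pos hyx, if_pos hcx] at h1; rw [if_pos hcx]; omega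
              · rw [if_pos hyx, if_neg hcx] at h1; rw [if_neg hcx]; omega
            · by_cases hcx : (kf c == kf x) = true
              · rw [if_neg hyx, if_pos hcx] at h1; rw [if_pos hcx]; omega
              · rw [if_neg hyx, if_neg hcx] at h1; rw [if_neg hcx]; omega
      rw [hLHS, hIH]
      -- key lists coincide
      have hkeys : dkL ((c' :: t).map kf) = dkL ((c :: y :: t).map kf) := by
        have : dkL ((c :: y :: t).map kf)
            = kf c :: ((kf y :: (dkL (t.map kf)).filter (fun j => j != kf y)).filter
                (fun j => j != kf c)) := by
          simp [dkL]
        rw [this]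
        have hyy : ((kf y :: (dkL (t.map kf)).filter (fun j => j != kf y)).filter
            (fun j => j != kf c))
            = (dkL (t.map kf)).filter (fun j => j != kf c) := by
          rw [List.filter_cons]
          have : ¬ ((kf y != kf c) = true) := by simp [h]
          rw [if_neg this, List.filter_filter]
          apply List.filter_congr
          intro j _
          by_cases hj : j = kf c <;> simp [hj, h] <;> simp [← h, hj]
        rw [hyy]
        simp [dkL, hkc']
      rw [hkeys]
      -- itm agrees on every listed key
      apply List.map_congr_left
      intro k hk
      have hk' : k ∈ (c :: y :: t).map kf := (mem_dkL _ k).1 hk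
      by_cases hkc : k = kf c
      · subst hkc
        have hgy : grp (c :: y :: t) (kf c) = c :: y :: grp t (kf c) := by
          rw [grp_cons, if_pos (by simp), grp_cons, if_pos (by simp [h])]
        have hgc' : grp (c' :: t) (kf c) = c' :: grp t (kf c) := by
          rw [grp_cons, if_pos (by simp [hkc'])]
        have hvc' : vf c' = vf c + vf y := vf_set c _ hc2
        simp only [itm, hgy, hgc']
        simp only [List.headD_cons, List.map_cons, List.sum_cons]
        rw [hvc', hc', List.set_set, add_assoc]
      · have h1 : grp (c :: y :: t) k = grp t k := by
          rw [grp_cons, if_neg (by simpa using fun hh => hkc hh.symm),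
            grp_cons, if_neg (by simp [← h]; intro hh; exact hkc hh.symm)]
        have h2 : grp (c' :: t) k = grp t k := by
          rw [grp_cons, if_neg (by simp [hkc']; intro hh; exact hkc hh.symm)]
        simp [itm, h1, h2]
    · -- distinct-key branch
      have hyc' : kf y < kf c := lt_of_le_of_ne hyc (fun hh => h hh.symm)
      have hLHS : mergeRun c (y :: t) = c :: mergeRun y t := by
        simp [mergeRun, h]
      have hIH : mergeRun y t = (dkL ((y :: t).map kf)).map (fun k => itm (y :: t) k) := by
        refine ih y (List.pairwise_cons.1 hpair).2 ?_ ?_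
        · rcases ht y List.mem_cons_self with h2 | h1
          · exact Or.inl h2
          · right
            intro z hz hzy
            have hz1 : 1 ≤ t.countP (fun w => kf w == kf y) :=
              one_le_countP t _ hz (by simp [hzy])
            rw [List.countP_cons, List.countP_cons] at h1
            have hcy : ¬ (kf c == kf y) = true := by simpa using h
            rw [if_pos (by simp : (kf y == kf y) = true), if_neg hcy] at h1
            omega
        · intro x hx
          rcases ht x (List.mem_cons_of_mem _ hx) with h2 | h1
          · exact Or.inl h2
          · right
            have hxy : kf x ≤ kf y := hyt x hx
            have hcx : ¬ (kf c == kf x) = true := by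
              simp only [beq_iff_eq]; intro hh; omega
            rw [List.countP_cons, List.countP_cons] at h1
            rw [List.countP_cons]
            by_cases hyx : (kf y == kf x) = true
            · rw [if_pos hyx] at h1 ⊢; rw [if_neg hcx] at h1; omega
            · rw [if_neg hyx] at h1 ⊢; rw [if_neg hcx] at h1; omega
      rw [hLHS, hIH]
      have hkeys : dkL ((c :: y :: t).map kf)
          = kf c :: dkL ((y :: t).map kf) := by
        have : dkL ((c :: y :: t).map kf)
            = kf c :: (dkL ((y :: t).map kf)).filter (fun j => j != kf c) := by
          simp [dkL]
        rw [this]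
        congr 1
        apply List.filter_eq_self.2
        intro j hj
        have hj' : j ∈ (y :: t).map kf := (mem_dkL _ j).1 hj
        rcases List.mem_map.1 hj' with ⟨z, hz, rfl⟩
        have : kf z ≤ kf y := by
          rcases List.mem_cons.1 hz with rfl | hz'
          · exact le_refl _
          · exact hyt z hz'
        simp only [bne_iff_ne, ne_eq, decide_eq_true_eq]
        intro hh; rw [hh] at this; omega
      rw [hkeys, List.map_cons]
      congr 1
      · -- head: c = itm (c :: y :: t) (kf c)
        have hg : grp (c :: y :: t) (kf c) = [c] := by
          rw [grp_cons, if_pos (by simp)]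
          rw [grp_eq_nil]
          intro z hz
          rcases List.mem_cons.1 hz with rfl | hz'
          · intro hh; rw [hh] at hyc'; omega
          · have := hyt z hz'; intro hh; rw [hh] at this; omega
        have hitmc : itm (c :: y :: t) (kf c) = c := by
          simp only [itm, hg, List.headD_cons, List.map_cons, List.map_nil, List.sum_cons,
            List.sum_nil, add_zero]
          exact set_one_vf c
        exact hitmc.symm
      · -- tail: itm agrees for keys < kf c
        apply List.map_congr_left
        intro k hk
        have hk' : k ∈ (y :: t).map kf := (mem_dkL _ k).1 hk
        rcases List.mem_map.1 hk' with ⟨z, hz, rfl⟩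
        have hgz : grp (c :: y :: t) (kf z) = grp (y :: t) (kf z) := by
          have hzy : kf z ≤ kf y := by
            rcases List.mem_cons.1 hz with rfl | hz'
            · exact le_refl _
            · exact hyt z hz'
          rw [grp_cons, if_neg]
          simp only [beq_iff_eq]; intro hh; omega
        simp only [itm, hgz]

-- STABILITY of Python's sort: the elements of any one key group keep their original order.
lemma insertBy_filter (k : Int) (x : List Int) : ∀ (acc : List (List Int)),
    acc.Pairwise (fun a b => kf b ≤ kf a) →
    (PySem.List.insertBy (fun a b => decide (kf b < kf a)) x acc).filter (fun y => kf y == k)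
      = acc.filter (fun y => kf y == k) ++ (if kf x == k then [x] else []) := by
  intro acc
  induction acc with
  | nil =>
    intro _
    simp [PySem.List.insertBy, List.filter_cons]
  | cons y ys ih =>
    intro hp
    rcases List.pairwise_cons.1 hp with ⟨hy, hys⟩
    by_cases h : kf y < kf x
    · have : PySem.List.insertBy (fun a b => decide (kf b < kf a)) x (y :: ys)
          = x :: y :: ys := by
        simp [PySem.List.insertBy, h]
      rw [this]
      by_cases hxk : kf x = k
      · have hnil : (y :: ys).filter (fun z => kf z == k) = [] := by
          apply List.filter_eq_nil_iff.2
          intro z hz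
          have hzy : kf z ≤ kf y := by
            rcases List.mem_cons.1 hz with rfl | hz'
            · exact le_refl _
            · exact hy z hz'
          simp only [beq_iff_eq]; intro hh; omega
        rw [List.filter_cons, if_pos (by simp [hxk]), hnil]
        simp [hxk]
      · rw [List.filter_cons, if_neg (by simpa using hxk)]
        simp [hxk]
    · have : PySem.List.insertBy (fun a b => decide (kf b < kf a)) x (y :: ys)
          = y :: PySem.List.insertBy (fun a b => decide (kf b < kf a)) x ys := by
        simp [PySem.List.insertBy, h]
      rw [this, List.filter_cons, List.filter_cons, ih hys]
      split <;> simp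

lemma grp_sortedRev (l : List (List Int)) (k : Int) :
    grp (PySem.List.sorted l (fun x => PySem.List.pyGetD x 0 0) true) k = grp l k := by
  induction l using List.reverseRecOn with
  | nil => rfl
  | append_singleton l x ih =>
    have h1 : PySem.List.sorted (l ++ [x]) (fun x => PySem.List.pyGetD x 0 0) true
        = PySem.List.insertBy (fun a b => decide (kf b < kf a)) x
            (PySem.List.sorted l (fun x => PySem.List.pyGetD x 0 0) true) := by
      rw [PySem.List.sorted_rev_eq_foldl_insertBy, PySem.List.sorted_rev_eq_foldl_insertBy,
        List.foldl_append]
      rfl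
    have hpair : (PySem.List.sorted l (fun x => PySem.List.pyGetD x 0 0) true).Pairwise
        (fun a b => kf b ≤ kf a) :=
      PySem.List.sorted_pairwise_rev l (fun x => PySem.List.pyGetD x 0 0)
    calc grp (PySem.List.sorted (l ++ [x]) (fun x => PySem.List.pyGetD x 0 0) true) k
        = (PySem.List.insertBy (fun a b => decide (kf b < kf a)) x
            (PySem.List.sorted l (fun x => PySem.List.pyGetD x 0 0) true)).filter
              (fun y => kf y == k) := by rw [h1]; rfl
      _ = grp (PySem.List.sorted l (fun x => PySem.List.pyGetD x 0 0) true) k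
            ++ (if kf x == k then [x] else []) :=
          insertBy_filter k x _ hpair
      _ = grp l k ++ (if kf x == k then [x] else []) := by rw [ih]
      _ = grp (l ++ [x]) k := by
          rw [grp_append]
          congr 1
          simp [grp, List.filter_cons]

-- ===== B side: the aggregation dict holds, per first-occurrence key, the merged item =====
def stepB (agg : PySem.Dict Int (List Int)) (pair : List Int) : PySem.Dict Int (List Int) :=
  agg.insert (PySem.List.pyGetD pair 0 0)
    (if agg.contains (PySem.List.pyGetD pair 0 0) then
      (agg.getD (PySem.List.pyGetD pair 0 0) []).set 1
        (PySem.List.pyGetD (agg.getD (PySem.List.pyGetD pair 0 0) []) 1 0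
          + PySem.List.pyGetD pair 1 0)
    else pair)

lemma pre_append (ab : List (List Int)) (p : List Int)
    (h : ∀ x ∈ ab ++ [p], 2 ≤ x.length ∨ (ab ++ [p]).countP (fun y => kf y == kf x) = 1) :
    ∀ x ∈ ab, 2 ≤ x.length ∨ ab.countP (fun y => kf y == kf x) = 1 := by
  intro x hx
  rcases h x (List.mem_append_left _ hx) with h2 | h1
  · exact Or.inl h2
  · right
    rw [List.countP_append, List.countP_cons, List.countP_nil] at h1
    have hx1 : 1 ≤ ab.countP (fun y => kf y == kf x) :=
      one_le_countP ab _ hx (by simp)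
    by_cases hpx : (kf p == kf x) = true
    · rw [if_pos hpx] at h1; omega
    · rw [if_neg hpx] at h1; omega

lemma itemsB : ∀ (ab : List (List Int)),
    (∀ x ∈ ab, 2 ≤ x.length ∨ ab.countP (fun y => kf y == kf x) = 1) →
    (ab.foldl stepB PySem.Dict.empty).items
      = (PySem.Set.ofList (ab.map kf)).map (fun k => (k, itm ab k)) := by
  intro ab
  induction ab using List.reverseRecOn with
  | nil => intro _; rfl
  | append_singleton ab p ih =>
    intro hpre
    have hpre' := pre_append ab p hpre
    have hitems := ih hpre'
    have hkeys : (ab.foldl stepB PySem.Dict.empty).keys = PySem.Set.ofList (ab.map kf) := by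
      show ((ab.foldl stepB PySem.Dict.empty).items).map (·.1) = _
      rw [hitems]
      have hmapfst : ∀ (L : List Int),
          (L.map (fun k => (k, itm ab k))).map (fun q => q.1) = L := by
        intro L
        induction L with
        | nil => rfl
        | cons a l ihl => simp [ihl]
      exact hmapfst _
    have hnodup : (ab.foldl stepB PySem.Dict.empty).keys.Nodup := by
      rw [hkeys]; exact PySem.Set.nodup_ofList _
    rw [List.foldl_append, List.foldl_cons, List.foldl_nil]
    by_cases hmem : kf p ∈ ab.map kf
    · -- existing key: overwrite in place
      have hcont : (ab.foldl stepB PySem.Dict.empty).contains (kf p) = true := by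
        rw [PySem.Dict.contains_iff_mem_keys, hkeys, PySem.Set.mem_ofList]
        exact hmem
      have hget : (ab.foldl stepB PySem.Dict.empty).getD (kf p) [] = itm ab (kf p) := by
        apply PySem.Dict.getD_of_mem_items
        · rw [hitems]
          exact List.mem_map.2 ⟨kf p, by rw [PySem.Set.mem_ofList]; exact hmem, rfl⟩
        · exact hnodup
      -- the stored value reads back the group total in its slot 1
      have hgrpne : grp ab (kf p) ≠ [] := grp_ne_nil_of_mem ab (kf p) hmem
      have hread : PySem.List.pyGetD (itm ab (kf p)) 1 0 = ((grp ab (kf p)).map vf).sum := by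
        by_cases h2 : 2 ≤ ((grp ab (kf p)).headD []).length
        · exact vf_set _ _ h2
        · -- the representative is short, so its key occurs exactly once: the group is a singleton
          have hkrep : kf ((grp ab (kf p)).headD []) = kf p := kf_head_grp ab (kf p) hgrpne
          have hrepmem : (grp ab (kf p)).headD [] ∈ ab := by
            rcases hg : grp ab (kf p) with _ | ⟨a, t⟩
            · exact absurd hg hgrpne
            · rw [List.headD_cons]
              have ha : a ∈ grp ab (kf p) := by rw [hg]; exact List.mem_cons_self
              exact List.mem_of_mem_filter ha
          rcases hpre' _ hrepmem with hh | hh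
          · exact absurd hh h2
          · rw [hkrep] at hh
            have hlen : (grp ab (kf p)).length = 1 := by
              rw [← hh, List.countP_eq_length_filter]
              rfl
            have hg1 : grp ab (kf p) = [(grp ab (kf p)).headD []] := by
              rcases hg : grp ab (kf p) with _ | ⟨a, t⟩
              · exact absurd hg hgrpne
              · rw [hg] at hlen
                simp at hlen
                simp [hg, hlen]
            rw [itm, hg1]
            simp only [List.headD_cons, List.map_cons, List.map_nil, List.sum_cons,
              List.sum_nil, add_zero]
            rw [set_one_vf]
            rfl
      have hv : (if (ab.foldl stepB PySem.Dict.empty).contains (kf p) then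
            ((ab.foldl stepB PySem.Dict.empty).getD (kf p) []).set 1
              (PySem.List.pyGetD ((ab.foldl stepB PySem.Dict.empty).getD (kf p) []) 1 0
                + PySem.List.pyGetD p 1 0)
          else p) = itm (ab ++ [p]) (kf p) := by
        rw [if_pos hcont, hget, hread]
        have hgp : grp (ab ++ [p]) (kf p) = grp ab (kf p) ++ [p] := by
          rw [grp_append]
          congr 1
          simp [grp, List.filter_cons]
        have hhead : (grp ab (kf p) ++ [p]).headD [] = (grp ab (kf p)).headD [] := by
          rcases hg : grp ab (kf p) with _ | ⟨a, t⟩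
          · exact absurd hg hgrpne
          · rfl
        have hrhs : itm (ab ++ [p]) (kf p)
            = ((grp ab (kf p)).headD []).set 1 (((grp ab (kf p)).map vf).sum + vf p) := by
          simp only [itm, hgp, hhead, List.map_append, List.sum_append, List.map_cons,
            List.map_nil, List.sum_cons, List.sum_nil, add_zero]
        rw [hrhs]
        simp only [itm, List.set_set]
        rfl
      show (stepB (ab.foldl stepB PySem.Dict.empty) p).items = _
      simp only [stepB]
      rw [show PySem.List.pyGetD p 0 0 = kf p from rfl]
      rw [hv]
      rw [PySem.Dict.items_insert_of_contains _ _ hcont, hitems]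
      have hofl : PySem.Set.ofList ((ab ++ [p]).map kf) = PySem.Set.ofList (ab.map kf) := by
        rw [List.map_append, List.map_cons, List.map_nil]
        show List.foldl PySem.Set.add PySem.Set.empty (ab.map kf ++ [kf p]) = _
        rw [List.foldl_append, List.foldl_cons, List.foldl_nil]
        show PySem.Set.add (PySem.Set.ofList (ab.map kf)) (kf p) = _
        have hctrue : (PySem.Set.ofList (ab.map kf)).contains (kf p) = true := by
          simp
          rcases List.mem_map.1 hmem with ⟨z, hz, hk⟩
          exact ⟨z, hz, hk⟩
        show (if (PySem.Set.ofList (ab.map kf)).contains (kf p) = true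
            then PySem.Set.ofList (ab.map kf)
            else PySem.Set.ofList (ab.map kf) ++ [kf p]) = PySem.Set.ofList (ab.map kf)
        rw [if_pos hctrue]
      rw [hofl, List.map_map]
      apply List.map_congr_left
      intro k hk
      show (if ((k, itm ab k).1 == kf p) = true then (kf p, itm (ab ++ [p]) (kf p))
          else (k, itm ab k)) = (k, itm (ab ++ [p]) k)
      by_cases hkp : k = kf p
      · subst hkp
        rw [if_pos (by simp)]
      · rw [if_neg (by simpa using hkp)]
        have hgk : itm (ab ++ [p]) k = itm ab k := by
          have hnil : grp [p] k = [] := by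
            apply grp_eq_nil
            intro z hz
            rcases List.mem_cons.1 hz with rfl | hz'
            · intro hh; exact hkp hh.symm
            · simp at hz'
          simp only [itm, grp_append, hnil, List.append_nil]
        rw [hgk]
    · -- fresh key: append
      have hcont : (ab.foldl stepB PySem.Dict.empty).contains (kf p) = false := by
        rw [← Bool.not_eq_true, PySem.Dict.contains_iff_mem_keys, hkeys, PySem.Set.mem_ofList]
        exact hmem
      show (stepB (ab.foldl stepB PySem.Dict.empty) p).items = _
      simp only [stepB]
      rw [show PySem.List.pyGetD p 0 0 = kf p from rfl]
      rw [if_neg (by simp [hcont])]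
      rw [PySem.Dict.items_insert_of_not_contains _ _ hcont, hitems]
      have hofl : PySem.Set.ofList ((ab ++ [p]).map kf)
          = PySem.Set.ofList (ab.map kf) ++ [kf p] := by
        rw [List.map_append, List.map_cons, List.map_nil]
        show List.foldl PySem.Set.add PySem.Set.empty (ab.map kf ++ [kf p]) = _
        rw [List.foldl_append, List.foldl_cons, List.foldl_nil]
        show PySem.Set.add (PySem.Set.ofList (ab.map kf)) (kf p) = _
        have hcfalse : (PySem.Set.ofList (ab.map kf)).contains (kf p) = false := by
          simp
          intro z hz hh
          exact hmem (List.mem_map.2 ⟨z, hz, hh⟩)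
        show (if (PySem.Set.ofList (ab.map kf)).contains (kf p) = true
            then PySem.Set.ofList (ab.map kf)
            else PySem.Set.ofList (ab.map kf) ++ [kf p])
          = PySem.Set.ofList (ab.map kf) ++ [kf p]
        rw [if_neg (fun hcc => by rw [hcfalse] at hcc; cases hcc)]
      rw [hofl, List.map_append, List.map_cons, List.map_nil]
      congr 1
      · apply List.map_congr_left
        intro k hk
        have hkmem : k ∈ ab.map kf := (PySem.Set.mem_ofList _ _).1 hk
        have hkp : k ≠ kf p := fun hh => hmem (hh ▸ hkmem)
        have hgk : itm (ab ++ [p]) k = itm ab k := by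
          have hnil : grp [p] k = [] := by
            apply grp_eq_nil
            intro z hz
            rcases List.mem_cons.1 hz with rfl | hz'
            · intro hh; exact hkp hh.symm
            · simp at hz'
          simp only [itm, grp_append, hnil, List.append_nil]
        rw [hgk]
      · have hgab : grp ab (kf p) = [] := by
          apply grp_eq_nil
          intro z hz hh
          exact hmem (List.mem_map.2 ⟨z, hz, hh⟩)
        have hgp1 : grp (ab ++ [p]) (kf p) = [p] := by
          rw [grp_append, hgab, List.nil_append]
          simp [grp, List.filter_cons]
        have hip : itm (ab ++ [p]) (kf p) = p := by
          simp only [itm, hgp1, List.headD_cons, List.map_cons, List.map_nil, List.sum_cons,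
            List.sum_nil, add_zero]
          exact set_one_vf p
        rw [hip]

-- ===== VERDICT-level assembly =====
theorem res_merge_eq_alt (ab : List (List Int)) (hpre : Pre_res_merge ab) :
    res_merge ab = res_merge_alt ab := by
  obtain ⟨hne, hpre⟩ := hpre
  -- Pre in kf form
  have hpre2 : ∀ x ∈ ab, 2 ≤ x.length ∨ ab.countP (fun y => kf y == kf x) = 1 := by
    intro x hx
    rcases (hpre x hx).2 with h2 | h1
    · exact Or.inl h2
    · right
      rw [← h1]
      apply List.countP_congr
      intro y _
      simp [kf_eq_headD]
  -- the sorted list is nonempty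
  rcases hseq : PySem.List.sorted ab (fun x => PySem.List.pyGetD x 0 0) true with _ | ⟨c, t⟩
  · exact absurd ((PySem.List.sorted_eq_nil_iff _ _ _).1 hseq) hne
  have hperm : (c :: t).Perm ab := by
    rw [← hseq]; exact PySem.List.sorted_perm ab _ _
  have hmemiff : ∀ z, z ∈ (c :: t) ↔ z ∈ ab := fun z => hperm.mem_iff
  have hcount : ∀ p : List Int → Bool, (c :: t).countP p = ab.countP p :=
    fun p => hperm.countP_eq p
  have hpairs : (c :: t).Pairwise (fun a b => kf b ≤ kf a) := by
    rw [← hseq]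
    exact PySem.List.sorted_pairwise_rev ab (fun x => PySem.List.pyGetD x 0 0)
  -- A's loop = mergeRun
  have hA : res_merge ab = mergeRun c t := by
    show (PySem.List.pyRange 1
        ((PySem.List.sorted ab (fun x => PySem.List.pyGetD x 0 0) true).length : Int)).foldl
        _ _ = _
    rw [hseq]
    have hinit : PySem.List.pyGetD (c :: t) 0 ([] : List Int) = c := by
      rw [PySem.List.pyGetD_zero]; rfl
    rw [hinit]
    refine (PySem.List.foldl_pyRange_pyGetD' (c :: t) [] stepA [c] (by norm_num)).trans ?_
    show List.foldl stepA ([] ++ [c]) t = mergeRun c t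
    rw [foldlA t [] c, List.nil_append]
  -- the runSpec hypotheses for c and t
  have hc : 2 ≤ c.length ∨ ∀ y ∈ t, kf y ≠ kf c := by
    rcases hpre2 c ((hmemiff c).1 List.mem_cons_self) with h2 | h1
    · exact Or.inl h2
    · right
      have h1' : (c :: t).countP (fun y => kf y == kf c) = 1 := by
        rw [hcount]; exact h1
      rw [List.countP_cons] at h1'
      simp only [beq_self_eq_true, if_true] at h1'
      intro y hy hh
      have h0 := List.countP_eq_zero.1 (by omega : t.countP (fun y => kf y == kf c) = 0) y hy
      exact h0 (by simp [hh])
  have ht : ∀ x ∈ t, 2 ≤ x.length ∨ (c :: t).countP (fun y => kf y == kf x) = 1 := by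
    intro x hx
    rcases hpre2 x ((hmemiff x).1 (List.mem_cons_of_mem _ hx)) with h2 | h1
    · exact Or.inl h2
    · right; rw [hcount]; exact h1
  have hrun := runSpec t c hpairs hc ht
  -- stability: groups (hence items) over the sorted list equal groups over ab
  have hgrp : ∀ k, grp (c :: t) k = grp ab k := by
    intro k
    have := grp_sortedRev ab k
    rw [hseq] at this
    exact this
  have hitm : ∀ k, itm (c :: t) k = itm ab k := by
    intro k; rw [itm, itm, hgrp]
  -- B's value
  have hvals : (res_merge_alt ab)
      = PySem.List.sorted ((PySem.Set.ofList (ab.map kf)).map (fun k => itm ab k))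
          (fun x => PySem.List.pyGetD x 0 0) true := by
    show PySem.List.sorted ((ab.foldl stepB PySem.Dict.empty).items.map (·.2)) _ true = _
    rw [itemsB ab hpre2, List.map_map]
    rfl
  -- the key-lists are permutations of each other
  have hmapkf : (c :: t).map kf = ((PySem.List.sorted ab (fun x => PySem.List.pyGetD x 0 0)
      true).map kf) := by rw [hseq]
  have hpairk : ((c :: t).map kf).Pairwise (fun a b => b ≤ a) :=
    List.pairwise_map.2 hpairs
  have hkperm : (dkL ((c :: t).map kf)).Perm (PySem.Set.ofList (ab.map kf)) := by
    rw [List.perm_ext_iff_of_nodup (dkL_nodup _ hpairk) (PySem.Set.nodup_ofList _)]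
    intro j
    rw [mem_dkL, PySem.Set.mem_ofList]
    constructor
    · intro hj
      rcases List.mem_map.1 hj with ⟨z, hz, rfl⟩
      exact List.mem_map.2 ⟨z, (hmemiff z).1 hz, rfl⟩
    · intro hj
      rcases List.mem_map.1 hj with ⟨z, hz, rfl⟩
      exact List.mem_map.2 ⟨z, (hmemiff z).2 hz, rfl⟩
  have hperm2 : ((dkL ((c :: t).map kf)).map (fun k => itm ab k)).Perm
      ((PySem.Set.ofList (ab.map kf)).map (fun k => itm ab k)) := hkperm.map _
  -- A's result has strictly descending keys
  have hgt : ((dkL ((c :: t).map kf)).map (fun k => itm ab k)).Pairwise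
      (fun a b => kf b < kf a) := by
    rw [List.pairwise_map]
    apply List.Pairwise.imp_of_mem ?_ (dkL_pairwise_gt _ hpairk)
    intro a b ha hb hlt
    have hamem : a ∈ ab.map kf := by
      rcases List.mem_map.1 ((mem_dkL _ a).1 ha) with ⟨z, hz, rfl⟩
      exact List.mem_map.2 ⟨z, (hmemiff z).1 hz, rfl⟩
    have hbmem : b ∈ ab.map kf := by
      rcases List.mem_map.1 ((mem_dkL _ b).1 hb) with ⟨z, hz, rfl⟩
      exact List.mem_map.2 ⟨z, (hmemiff z).1 hz, rfl⟩
    rw [kf_itm ab a hamem, kf_itm ab b hbmem]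
    exact hlt
  -- name B's sorted output via the permutation + sortedness characterisation
  have hsortid : PySem.List.sorted ((PySem.Set.ofList (ab.map kf)).map (fun k => itm ab k))
      (fun x => PySem.List.pyGetD x 0 0) true
      = (dkL ((c :: t).map kf)).map (fun k => itm ab k) :=
    PySem.List.sorted_rev_eq_of_perm_of_pairwise_gt _ _ _ hperm2 hgt
  rw [hA, hrun, hvals, hsortid]
  apply List.map_congr_left
  intro k _
  exact hitm k

-- ===== VERDICT (by name: the statement is the Claim_ definition above) =====
theorem res_merge_spec : Claim_equal_res_merge := by
  intro ab _ hpre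
  show res_merge ab = res_merge_alt ab
  exact res_merge_eq_alt ab hpre
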